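-- pv_equiv track=rewrite | github.com/ivglad/cognify-ai | backend/app/services/kg/relation_extractor.py | _infer_relation_type
-- ===== SOURCE A (Python) =====
-- from typing import List, Dict, Any, Optional, Set, Tuple
--
-- def _infer_relation_type(
--                        entity1: Dict[str, Any],
--                        entity2: Dict[str, Any],
--                        context: str) -> str:
--     """Infer relation type based on entity types and context."""
--     try:
--         type1 = entity1.get('type', '')
--         type2 = entity2.get('type', '')
--         context_lower = context.lower()
--
--         # Type-based relation inference
--         if type1 == 'Person' and type2 == 'Organization':
--             if any(word in context_lower for word in ['works', 'employed', 'ceo', 'director']):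
--                 return 'works_for'
--             else:
--                 return 'associated_with'
--
--         elif type1 == 'Person' and type2 == 'Location':
--             if any(word in context_lower for word in ['born', 'from', 'lives']):
--                 return 'located_in'
--             else:
--                 return 'associated_with'
--
--         elif type1 == 'Technology' and type2 == 'Organization':
--             if any(word in context_lower for word in ['developed', 'created', 'made']):
--                 return 'created_by'
--             else:
--                 return 'used_by'
--
--         elif type1 == 'Product' and type2 == 'Organization':
--             return 'created_by'
--
--         elif 'Concept' in [type1, type2]:
--             return 'related_to'
--
--         # Default relation
--         return 'associated_with'
--
--     except Exception:
--         return 'related_to'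
-- ===== SOURCE B (Python) =====
-- # B: flat first-match decision table -- each keyword becomes its own row
-- # (type1-pattern, type2-pattern, keyword-or-None, relation), with '*' wildcards
-- # for the Concept fallback rows; one linear scan returns the first matching row.
-- _ROWS = [
--     ('Person', 'Organization', 'works', 'works_for'),
--     ('Person', 'Organization', 'employed', 'works_for'),
--     ('Person', 'Organization', 'ceo', 'works_for'),
--     ('Person', 'Organization', 'director', 'works_for'),
--     ('Person', 'Organization', None, 'associated_with'),
--     ('Person', 'Location', 'born', 'located_in'),
--     ('Person', 'Location', 'from', 'located_in'),
--     ('Person', 'Location', 'lives', 'located_in'),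
--     ('Person', 'Location', None, 'associated_with'),
--     ('Technology', 'Organization', 'developed', 'created_by'),
--     ('Technology', 'Organization', 'created', 'created_by'),
--     ('Technology', 'Organization', 'made', 'created_by'),
--     ('Technology', 'Organization', None, 'used_by'),
--     ('Product', 'Organization', None, 'created_by'),
--     ('Concept', '*', None, 'related_to'),
--     ('*', 'Concept', None, 'related_to'),
-- ]
--
-- def _infer_relation_type(entity1, entity2, context):
--     try:
--         t1 = entity1.get('type', '')
--         t2 = entity2.get('type', '')
--         ctx = context.lower()
--         for p1, p2, kw, rel in _ROWS:
--             if (p1 == '*' or p1 == t1) and (p2 == '*' or p2 == t2) \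
--                     and (kw is None or kw in ctx):
--                 return rel
--         return 'associated_with'
--     except Exception:
--         return 'related_to'
-- ===== Notes on version B (the rewrite author's own statement) =====
-- stated objective: idiomatic
-- what changed: Replaces the if/elif chain with nested keyword scans by one linear first-match scan over a flat decision table whose rows are (type1-pattern, type2-pattern, optional keyword, relation), using '*' wildcard rows for the Concept fallbacks.
import Mathlib
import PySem

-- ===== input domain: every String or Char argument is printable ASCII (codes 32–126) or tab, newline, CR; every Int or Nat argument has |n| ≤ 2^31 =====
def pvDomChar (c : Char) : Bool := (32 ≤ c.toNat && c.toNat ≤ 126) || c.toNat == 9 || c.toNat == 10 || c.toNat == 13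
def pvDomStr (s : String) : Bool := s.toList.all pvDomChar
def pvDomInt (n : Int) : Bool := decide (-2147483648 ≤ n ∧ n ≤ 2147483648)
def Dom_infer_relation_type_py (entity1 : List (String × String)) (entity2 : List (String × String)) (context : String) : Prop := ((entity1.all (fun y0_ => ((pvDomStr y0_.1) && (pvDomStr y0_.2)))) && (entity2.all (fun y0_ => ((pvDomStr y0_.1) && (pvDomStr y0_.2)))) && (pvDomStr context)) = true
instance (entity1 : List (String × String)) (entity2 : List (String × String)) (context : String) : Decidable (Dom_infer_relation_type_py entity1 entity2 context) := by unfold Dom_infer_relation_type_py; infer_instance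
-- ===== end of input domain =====

-- B flattens the if/elif chain with nested keyword scans into one linear
-- first-match scan over a flat decision table with '*' wildcards (idiomatic
-- data-driven rewrite, same cost); return value only.
-- ===== PORT A =====
def infer_relation_type_py (entity1 : List (String × String)) (entity2 : List (String × String)) (context : String) : String :=
  let type1 := (PySem.Dict.mk entity1).getD "type" ""
  let type2 := (PySem.Dict.mk entity2).getD "type" ""
  let context_lower := PySem.Str.lower context
  if type1 = "Person" ∧ type2 = "Organization" then
    (if ["works", "employed", "ceo", "director"].any (fun w => PySem.Str.isIn w context_lower) then "works_for" else "associated_with")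
  else if type1 = "Person" ∧ type2 = "Location" then
    (if ["born", "from", "lives"].any (fun w => PySem.Str.isIn w context_lower) then "located_in" else "associated_with")
  else if type1 = "Technology" ∧ type2 = "Organization" then
    (if ["developed", "created", "made"].any (fun w => PySem.Str.isIn w context_lower) then "created_by" else "used_by")
  else if type1 = "Product" ∧ type2 = "Organization" then "created_by"
  else if "Concept" ∈ [type1, type2] then "related_to"
  else "associated_with"

-- ===== PORT B =====
-- Flat decision table: (type1-pattern, type2-pattern, optional keyword, relation)
def pvRows : List (String × String × Option String × String) :=
  [ ("Person", "Organization", some "works", "works_for"),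
    ("Person", "Organization", some "employed", "works_for"),
    ("Person", "Organization", some "ceo", "works_for"),
    ("Person", "Organization", some "director", "works_for"),
    ("Person", "Organization", none, "associated_with"),
    ("Person", "Location", some "born", "located_in"),
    ("Person", "Location", some "from", "located_in"),
    ("Person", "Location", some "lives", "located_in"),
    ("Person", "Location", none, "associated_with"),
    ("Technology", "Organization", some "developed", "created_by"),
    ("Technology", "Organization", some "created", "created_by"),
    ("Technology", "Organization", some "made", "created_by"),
    ("Technology", "Organization", none, "used_by"),
    ("Product", "Organization", none, "created_by"),
    ("Concept", "*", none, "related_to"),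
    ("*", "Concept", none, "related_to") ]

-- '*' wildcard pattern match
def pvMatch (p t : String) : Bool := p == "*" || p == t

-- first-match scan over the rows (the for-loop of Source B); fall-through default
def pvScan (t1 t2 ctx : String) : List (String × String × Option String × String) → String
  | [] => "associated_with"
  | (p1, p2, kw, rel) :: rest =>
      if pvMatch p1 t1 && pvMatch p2 t2 &&
         (match kw with | none => true | some w => PySem.Str.isIn w ctx) then rel
      else pvScan t1 t2 ctx rest

def infer_relation_type_py_alt (entity1 : List (String × String)) (entity2 : List (String × String)) (context : String) : String :=
  pvScan ((PySem.Dict.mk entity1).getD "type" "") ((PySem.Dict.mk entity2).getD "type" "")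
    (PySem.Str.lower context) pvRows

-- ===== PRECONDITION & SPEC =====
def Spec_infer_relation_type_py (entity1 : List (String × String)) (entity2 : List (String × String)) (context : String) (out : String) : Prop := out = infer_relation_type_py_alt entity1 entity2 context
instance (entity1 : List (String × String)) (entity2 : List (String × String)) (context : String) (out : String) : Decidable (Spec_infer_relation_type_py entity1 entity2 context out) := by unfold Spec_infer_relation_type_py; infer_instance

-- ===== CLAIM (what is proved, stated in full; the proofs are below) =====
def Claim_equal_infer_relation_type_py : Prop := ∀ (entity1 : List (String × String)) (entity2 : List (String × String)) (context : String), Dom_infer_relation_type_py entity1 entity2 context → Spec_infer_relation_type_py entity1 entity2 context (infer_relation_type_py entity1 entity2 context)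

-- ===== LEMMAS AND PROOFS =====

-- ===== VERDICT (by name: the statement is the Claim_ definition above) =====
set_option maxHeartbeats 1000000 in
theorem infer_relation_type_py_spec : Claim_equal_infer_relation_type_py := by
  intro entity1 entity2 context _
  unfold Spec_infer_relation_type_py infer_relation_type_py infer_relation_type_py_alt pvRows
  generalize (PySem.Dict.mk entity1).getD "type" "" = t1
  generalize (PySem.Dict.mk entity2).getD "type" "" = t2
  generalize PySem.Str.lower context = c
  by_cases h1 : t1 = "Person"
  · subst h1
    by_cases h2 : t2 = "Organization"
    · subst h2; simp [pvScan, pvMatch]; split_ifs <;> simp_all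
    · have h2' := Ne.symm h2
      by_cases h3 : t2 = "Location"
      · subst h3; simp [pvScan, pvMatch]; split_ifs <;> simp_all
      · have h3' := Ne.symm h3
        by_cases h7 : t2 = "Concept"
        · subst h7; simp [pvScan, pvMatch]
        · have h7' := Ne.symm h7
          simp [pvScan, pvMatch, h2, h3, h2', h3', h7']
  · have h1' := Ne.symm h1
    by_cases h4 : t1 = "Technology"
    · subst h4
      by_cases h2 : t2 = "Organization"
      · subst h2; simp [pvScan, pvMatch]; split_ifs <;> simp_all
      · have h2' := Ne.symm h2
        by_cases h7 : t2 = "Concept"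
        · subst h7; simp [pvScan, pvMatch]
        · have h7' := Ne.symm h7
          simp [pvScan, pvMatch, h2, h2', h7']
    · have h4' := Ne.symm h4
      by_cases h5 : t1 = "Product"
      · subst h5
        by_cases h2 : t2 = "Organization"
        · subst h2; simp [pvScan, pvMatch]
        · have h2' := Ne.symm h2
          by_cases h7 : t2 = "Concept"
          · subst h7; simp [pvScan, pvMatch]
          · have h7' := Ne.symm h7
            simp [pvScan, pvMatch, h2, h2', h7']
      · have h5' := Ne.symm h5
        by_cases h6 : t1 = "Concept"
        · subst h6; simp [pvScan, pvMatch]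
        · have h6' := Ne.symm h6
          by_cases h7 : t2 = "Concept"
          · subst h7
            simp [pvScan, pvMatch, h1, h4, h5, h6']
          · have h7' := Ne.symm h7
            simp [pvScan, pvMatch, h1, h4, h5, h1', h4', h5', h6', h7']
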